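-- pv_equiv track=rewrite | github.com/wguanicedew/iDDS | doma/lib/idds/doma/workflow/domalsstwork.py | get_map_id_from_input
-- ===== SOURCE A (Python) =====
-- def get_map_id_from_input(input_output_maps, input_file):
--     map_keys = list(input_output_maps.keys())
--     map_keys.reverse()
--     for map_id in map_keys:
--         inputs = input_output_maps[map_id]['inputs']
--         # outputs = input_output_maps[map_id]['outputs']
--         for content in inputs:
--             if content['name'] == input_file:
--                 return map_id
--     return None
-- ===== SOURCE B (Python) =====
-- def get_map_id_from_input(input_output_maps, input_file):
--     index = {}
--     for map_id, m in input_output_maps.items():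
--         for content in m['inputs']:
--             index[content['name']] = map_id
--     return index.get(input_file)
-- ===== Notes on version B (the rewrite author's own statement) =====
-- stated objective: simpler
-- what changed: A reverses the key list and scans maps with an early return on the first match; B makes one forward pass building a name->map_id index dict (later maps overwrite earlier ones, matching A's reverse-first-match) and ends with a single index.get(input_file).
-- outside the precondition, e.g. on get_map_id_from_input({1: {}, 2: {'inputs': [{'name': 'f'}]}}, 'f'): A returns 2, B raises KeyError; on get_map_id_from_input({1: {'inputs': [{'name': 'f'}, {}]}}, 'f'): A returns 1, B raises KeyError
import Mathlib
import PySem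

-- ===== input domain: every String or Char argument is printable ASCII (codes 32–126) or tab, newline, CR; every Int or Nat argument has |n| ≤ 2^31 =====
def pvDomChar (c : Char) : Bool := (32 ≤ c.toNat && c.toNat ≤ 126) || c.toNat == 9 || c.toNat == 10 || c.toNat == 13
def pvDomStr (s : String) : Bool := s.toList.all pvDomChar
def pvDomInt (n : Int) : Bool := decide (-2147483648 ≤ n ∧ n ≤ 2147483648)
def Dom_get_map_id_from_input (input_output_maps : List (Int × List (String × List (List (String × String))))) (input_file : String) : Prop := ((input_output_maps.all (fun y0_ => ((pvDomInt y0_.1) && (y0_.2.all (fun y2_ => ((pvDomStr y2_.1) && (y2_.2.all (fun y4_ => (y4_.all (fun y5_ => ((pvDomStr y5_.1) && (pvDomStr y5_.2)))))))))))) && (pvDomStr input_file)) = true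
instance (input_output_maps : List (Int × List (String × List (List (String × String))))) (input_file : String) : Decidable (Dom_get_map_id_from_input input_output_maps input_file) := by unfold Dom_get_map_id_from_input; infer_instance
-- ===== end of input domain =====

-- B replaces A's reversed scan with one forward index-building pass plus a single dict lookup (simpler, same cost).
-- ===== PORT A =====
-- content['name'] == input_file; exact inside Pre_ (every content dict has a "name" key there)
def pvAMatch (contents : List (List (String × String))) (input_file : String) : Bool :=
  match contents with
  | [] => false
  | c :: cs =>
    if (((PySem.Dict.mk c).get? "name").getD "") == input_file then true
    else pvAMatch cs input_file

-- the reversed for-loop of A with its early return; dict lookups exact inside Pre_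
def pvAScan (input_output_maps : List (Int × List (String × List (List (String × String)))))
    (input_file : String) : List Int → Option Int
  | [] => none
  | map_id :: rest =>
    let d := (((PySem.Dict.mk input_output_maps).get? map_id).getD [])
    let inputs := (((PySem.Dict.mk d).get? "inputs").getD [])
    if pvAMatch inputs input_file then some map_id else pvAScan input_output_maps input_file rest

def get_map_id_from_input (input_output_maps : List (Int × List (String × List (List (String × String))))) (input_file : String) : Option Int :=
  pvAScan input_output_maps input_file ((input_output_maps.map Prod.fst).reverse)

-- ===== PORT B =====
-- the forward index-building pass of Source B; dict lookups exact inside Pre_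
def pvBIndex (input_output_maps : List (Int × List (String × List (List (String × String))))) :
    PySem.Dict String Int :=
  input_output_maps.foldl
    (fun idx p =>
      (((PySem.Dict.mk p.2).get? "inputs").getD []).foldl
        (fun idx c => idx.insert (((PySem.Dict.mk c).get? "name").getD "") p.1) idx)
    PySem.Dict.empty

def get_map_id_from_input_alt (input_output_maps : List (Int × List (String × List (List (String × String))))) (input_file : String) : Option Int :=
  (pvBIndex input_output_maps).get? input_file

-- ===== PRECONDITION & SPEC =====
-- Pre_ excludes inputs on which Python raises KeyError: a map value without an "inputs" key, or a
-- content in an "inputs" list without a "name" key (A raises there unless a later-key map already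
-- matched; B, building its full index first, raises on any such entry).  The Nodup conjunct only
-- rules out association lists no Python dict can be (duplicate keys).
def Pre_get_map_id_from_input (input_output_maps : List (Int × List (String × List (List (String × String))))) (input_file : String) : Prop :=
  (input_output_maps.map Prod.fst).Nodup ∧
  ∀ p ∈ input_output_maps,
    "inputs" ∈ p.2.map Prod.fst ∧
    ∀ c ∈ ((PySem.Dict.mk p.2).get? "inputs").getD [], "name" ∈ c.map Prod.fst
instance (input_output_maps : List (Int × List (String × List (List (String × String))))) (input_file : String) : Decidable (Pre_get_map_id_from_input input_output_maps input_file) := by unfold Pre_get_map_id_from_input; infer_instance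

def pvWitness_get_map_id_from_input : (List (Int × List (String × List (List (String × String))))) × String :=
  ([(1, [("inputs", [[("name", "f")]])]), (2, [("inputs", [[("name", "g")]])])], "f")

def Spec_get_map_id_from_input (input_output_maps : List (Int × List (String × List (List (String × String))))) (input_file : String) (out : Option Int) : Prop := out = get_map_id_from_input_alt input_output_maps input_file
instance (input_output_maps : List (Int × List (String × List (List (String × String))))) (input_file : String) (out : Option Int) : Decidable (Spec_get_map_id_from_input input_output_maps input_file out) := by unfold Spec_get_map_id_from_input; infer_instance

-- ===== CLAIM (what is proved, stated in full; the proofs are below) =====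
def Claim_equal_get_map_id_from_input : Prop := ∀ (input_output_maps : List (Int × List (String × List (List (String × String))))) (input_file : String), Dom_get_map_id_from_input input_output_maps input_file → Pre_get_map_id_from_input input_output_maps input_file → Spec_get_map_id_from_input input_output_maps input_file (get_map_id_from_input input_output_maps input_file)

-- ===== LEMMAS AND PROOFS =====

theorem pv_get?_mk_append {K V : Type} [BEq K] (as bs : List (K × V)) (x : K) :
    (PySem.Dict.mk (as ++ bs)).get? x =
      ((PySem.Dict.mk as).get? x).or ((PySem.Dict.mk bs).get? x) := by
  induction as with
  | nil => simp [PySem.Dict.get?]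
  | cons p as ih =>
    cases p with
    | mk k v =>
      by_cases h : (k == x)
      · simp [PySem.Dict.get?_mk_cons, h]
      · simp [PySem.Dict.get?_mk_cons, h, ih]

theorem pv_get?_mk_isSome_of_mem {K V : Type} [BEq K] [LawfulBEq K]
    (as : List (K × V)) (x : K) (h : x ∈ as.map Prod.fst) :
    ((PySem.Dict.mk as).get? x).isSome := by
  induction as with
  | nil => simp at h
  | cons p as ih =>
    obtain ⟨k, v⟩ := p
    rw [List.map_cons, List.mem_cons] at h
    by_cases hk : (k == x)
    · simp [PySem.Dict.get?_mk_cons, hk]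
    · rcases h with h | h
      · exact absurd (by simp [h]) hk
      · simpa [PySem.Dict.get?_mk_cons, hk] using ih h

theorem pvAScan_append (ms : List (Int × List (String × List (List (String × String)))))
    (extra : List (Int × List (String × List (List (String × String)))))
    (f : String) (ks : List Int)
    (h : ∀ j ∈ ks, ((PySem.Dict.mk ms).get? j).isSome) :
    pvAScan (ms ++ extra) f ks = pvAScan ms f ks := by
  induction ks with
  | nil => rfl
  | cons k ks ih =>
    have hk := h k (by simp)
    have hrest : ∀ j ∈ ks, ((PySem.Dict.mk ms).get? j).isSome := fun j hj => h j (by simp [hj])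
    have hlook : (PySem.Dict.mk (ms ++ extra)).get? k = (PySem.Dict.mk ms).get? k := by
      rw [pv_get?_mk_append]
      cases hv : (PySem.Dict.mk ms).get? k with
      | none => rw [hv] at hk; simp at hk
      | some v => simp
    simp only [pvAScan, hlook, ih hrest]

theorem pvBIndex_inner (cs : List (List (String × String))) (idx : PySem.Dict String Int)
    (k : Int) (f : String) :
    (cs.foldl (fun idx c => idx.insert (((PySem.Dict.mk c).get? "name").getD "") k) idx).get? f =
      if pvAMatch cs f then some k else idx.get? f := by
  induction cs generalizing idx with
  | nil => simp [pvAMatch]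
  | cons c cs ih =>
    rw [List.foldl_cons, ih]
    by_cases hm : pvAMatch cs f = true
    · simp [pvAMatch, hm]
    · simp only [Bool.not_eq_true] at hm
      by_cases hc : (((PySem.Dict.mk c).get? "name").getD "") == f
      · have : f = (((PySem.Dict.mk c).get? "name").getD "") := (eq_of_beq hc).symm
        simp [pvAMatch, this]
      · have : f ≠ (((PySem.Dict.mk c).get? "name").getD "") := by
          intro h; exact hc (by simp [h])
        simp [pvAMatch, hc, hm, PySem.Dict.get?_insert, this]

theorem pv_main (ms : List (Int × List (String × List (List (String × String)))))
    (f : String) (h : (ms.map Prod.fst).Nodup) :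
    get_map_id_from_input ms f = get_map_id_from_input_alt ms f := by
  induction ms using List.reverseRecOn with
  | nil => rfl
  | append_singleton ms p ih =>
    cases p with
    | mk k v =>
      have hmap : (ms ++ [(k, v)]).map Prod.fst = ms.map Prod.fst ++ [k] := by simp
      rw [hmap] at h
      have hnd : (ms.map Prod.fst).Nodup := (List.nodup_append.mp h).1
      have hk : k ∉ ms.map Prod.fst := by
        intro hmem
        exact (List.nodup_append.mp h).2.2 k hmem k (by simp) rfl
      have hlookk : (PySem.Dict.mk (ms ++ [(k, v)])).get? k = some v := by
        rw [pv_get?_mk_append]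
        have hnone : (PySem.Dict.mk ms).get? k = none := by
          cases hv : (PySem.Dict.mk ms).get? k with
          | none => rfl
          | some w =>
            exfalso
            have hmem : (k, w) ∈ (PySem.Dict.mk ms).items :=
              PySem.Dict.mem_items_of_get?_eq_some (PySem.Dict.mk ms) hv
            exact hk (by simpa [PySem.Dict.items] using List.mem_map_of_mem (f := Prod.fst) hmem)
        simp [hnone, PySem.Dict.get?_mk_cons]
      -- A side
      have hA : get_map_id_from_input (ms ++ [(k, v)]) f =
          (if pvAMatch (((PySem.Dict.mk v).get? "inputs").getD []) f then some k
           else get_map_id_from_input ms f) := by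
        unfold get_map_id_from_input
        rw [hmap, List.reverse_append]
        simp only [List.reverse_singleton, List.singleton_append, pvAScan, hlookk]
        rw [pvAScan_append ms [(k, v)] f ((ms.map Prod.fst).reverse)
          (fun j hj => pv_get?_mk_isSome_of_mem ms j (by simpa using hj))]
        rfl
      -- B side
      have hB : get_map_id_from_input_alt (ms ++ [(k, v)]) f =
          (if pvAMatch (((PySem.Dict.mk v).get? "inputs").getD []) f then some k
           else get_map_id_from_input_alt ms f) := by
        unfold get_map_id_from_input_alt pvBIndex
        rw [List.foldl_append, List.foldl_cons, List.foldl_nil]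
        exact pvBIndex_inner _ _ _ _
      rw [hA, hB, ih hnd]

-- ===== VERDICT (by name: the statement is the Claim_ definition above) =====
theorem get_map_id_from_input_spec : Claim_equal_get_map_id_from_input := by
  intro ms f _ hpre
  unfold Spec_get_map_id_from_input
  exact pv_main ms f hpre.1
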